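-- pv_equiv track=rewrite | github.com/kuweg/homework_repository_epam | homework7/hw2.py | backspace_formatter
-- ===== SOURCE A (Python) =====
-- from typing import Generator
--
-- def backspace_formatter(string: str, backspace_char: str = "#") -> Generator:
--     """A functions which imitates a backspace behaviour."""
--     backspace_counter = 0
--     for char in reversed(string):
--         if char != backspace_char and not backspace_counter:
--             yield char
--         elif char == backspace_char:
--             backspace_counter += 1
--         elif char != backspace_char and backspace_counter > 0:
--             backspace_counter -= 1
-- ===== SOURCE B (Python) =====
-- from typing import Generator
--
-- def backspace_formatter(string: str, backspace_char: str = "#") -> Generator: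
--     """Imitate backspace behaviour: forward stack, then emit survivors reversed."""
--     stack = []
--     for char in string:
--         if char == backspace_char:
--             if stack:
--                 stack.pop()
--         else:
--             stack.append(char)
--     yield from reversed(stack)
-- ===== Notes on version B (the rewrite author's own statement) =====
-- stated objective: idiomatic
-- what changed: Replaces A's right-to-left scan with a pending-backspace counter by the standard left-to-right stack (push char, backspace pops), emitting the stack reversed at the end.
import Mathlib
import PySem

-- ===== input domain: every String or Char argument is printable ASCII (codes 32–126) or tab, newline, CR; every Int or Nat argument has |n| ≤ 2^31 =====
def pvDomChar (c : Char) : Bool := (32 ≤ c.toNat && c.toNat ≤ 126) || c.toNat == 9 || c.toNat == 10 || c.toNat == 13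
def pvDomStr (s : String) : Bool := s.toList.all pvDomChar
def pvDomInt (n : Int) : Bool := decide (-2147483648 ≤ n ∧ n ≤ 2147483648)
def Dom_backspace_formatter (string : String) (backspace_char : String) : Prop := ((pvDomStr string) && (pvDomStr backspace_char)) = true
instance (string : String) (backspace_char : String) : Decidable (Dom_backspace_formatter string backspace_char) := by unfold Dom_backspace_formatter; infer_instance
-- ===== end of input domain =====

-- B replaces A's right-to-left scan with a pending-backspace counter by the
-- standard left-to-right stack, emitted reversed (idiomatic; same O(n) cost).
-- ===== PORT A =====
-- A's generator loop over reversed(string) with its backspace_counter, yielded chars collected in order.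
def bfA_go (backspace_char : String) : List Char → Nat → List String
  | [], _ => []
  | c :: rest, k =>
    if String.ofList [c] ≠ backspace_char ∧ k = 0 then String.ofList [c] :: bfA_go backspace_char rest k
    else if String.ofList [c] = backspace_char then bfA_go backspace_char rest (k + 1)
    else bfA_go backspace_char rest (k - 1)

def backspace_formatter (string : String) (backspace_char : String) : List String :=
  bfA_go backspace_char string.toList.reverse 0

-- ===== PORT B =====
-- one loop iteration of B: backspace pops the stack (no-op on empty = List.dropLast), else push
def bfB_step (backspace_char : String) (st : List String) (c : Char) : List String :=
  if String.ofList [c] = backspace_char then st.dropLast else st ++ [String.ofList [c]]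

def backspace_formatter_alt (string : String) (backspace_char : String) : List String :=
  (string.toList.foldl (bfB_step backspace_char) []).reverse

-- ===== PRECONDITION & SPEC =====
def Spec_backspace_formatter (string : String) (backspace_char : String) (out : List String) : Prop := out = backspace_formatter_alt string backspace_char
instance (string : String) (backspace_char : String) (out : List String) : Decidable (Spec_backspace_formatter string backspace_char out) := by unfold Spec_backspace_formatter; infer_instance

-- ===== CLAIM (what is proved, stated in full; the proofs are below) =====
def Claim_equal_backspace_formatter : Prop := ∀ (string : String) (backspace_char : String), Dom_backspace_formatter string backspace_char → Spec_backspace_formatter string backspace_char (backspace_formatter string backspace_char)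

-- ===== LEMMAS AND PROOFS =====


-- drop the last k elements, one at a time (pending backspaces not yet matched by A)
def pvDropLastN {α : Type} : Nat → List α → List α
  | 0, xs => xs
  | k + 1, xs => pvDropLastN k xs.dropLast

theorem pvDropLastN_nil {α : Type} (k : Nat) : pvDropLastN (α := α) k [] = [] := by
  induction k with
  | zero => rfl
  | succ k ih => simpa [pvDropLastN] using ih

theorem bf_main (b : String) (l : List Char) (k : Nat) :
    bfA_go b l.reverse k = (pvDropLastN k (l.foldl (bfB_step b) [])).reverse := by
  induction l using List.reverseRecOn generalizing k with
  | nil => simp [bfA_go, pvDropLastN_nil]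
  | append_singleton l' c ih =>
    rw [List.reverse_append, List.foldl_append]
    simp only [List.reverse_cons, List.reverse_nil, List.nil_append, List.cons_append,
      List.foldl_cons, List.foldl_nil]
    by_cases hb : String.ofList [c] = b
    · rw [show bfA_go b (c :: l'.reverse) k = bfA_go b l'.reverse (k + 1) by
        simp [bfA_go, hb]]
      rw [ih (k + 1)]
      simp [bfB_step, hb, pvDropLastN]
    · cases k with
      | zero =>
        rw [show bfA_go b (c :: l'.reverse) 0
              = String.ofList [c] :: bfA_go b l'.reverse 0 by simp [bfA_go, hb]]
        rw [ih 0]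
        simp [bfB_step, hb, pvDropLastN]
      | succ j =>
        rw [show bfA_go b (c :: l'.reverse) (j + 1) = bfA_go b l'.reverse j by
          simp [bfA_go, hb]]
        rw [ih j]
        simp [bfB_step, hb, pvDropLastN]

-- ===== VERDICT (by name: the statement is the Claim_ definition above) =====
theorem backspace_formatter_spec : Claim_equal_backspace_formatter := by
  intro s b _
  unfold Spec_backspace_formatter backspace_formatter backspace_formatter_alt
  simpa using bf_main b s.toList 0
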